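-- pv_equiv track=rewrite | github.com/981377660LMT/algorithm-study | 11_动态规划/背包问题/1_完全背包/同余最短路/同余最短路的转圈技巧/同余最短路的转圈技巧.py | modShortestPath
-- ===== SOURCE A (Python) =====
-- from math import gcd
-- from typing import Iterable, List, Tuple
--
-- INF = int(4e18)
--
-- def min2(a: int, b: int) -> int:
--     return a if a < b else b
--
-- def modShortestPath(coeffs: Iterable[int]) -> Tuple[int, List[int]]:
--     """确定线性组合∑ai*xi的可能取到的值(ai非负)
--
--     Args:
--         coeffs (List[int]): 非负整数系数,最小的非零ai称为base
--
--     Returns: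
--         Tuple[int, List[int]]: base, dist
--         base (int): 最小的非零ai
--         dist (List[int]): dist[i]记录的是最小的x,满足x=i(mod base)且x能被系数coeffs线性表出(xi非负)
--         如果不存在这样的x,则dist[i]为INF
--         如果coeff全为0,则返回空数组
--     """
--     coeffs = [v for v in coeffs if v > 0]
--     if not coeffs:
--         return 0, []
--
--     base = min(coeffs)
--     dp = [INF] * base  # dp[i]表示模base余数为i时，最小的k
--     dp[0] = 0
--     for v in coeffs:
--         cycle = gcd(base, v)  # 在这些环上转移
--         for j in range(cycle):
--             cur = j
--             count = 0
--             while count < 2:  # 转两圈，涵盖从每个点出发的情况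
--                 next = (cur + v) % base
--                 dp[next] = min2(dp[next], dp[cur] + v)
--                 cur = next
--                 count += cur == j
--     return base, dp
-- ===== SOURCE B (Python) =====
-- INF = int(4e18)
--
--
-- def modShortestPath(coeffs):
--     """Bellman-Ford-style relaxation to a fixpoint on the residue graph:
--     repeatedly relax every edge r -> (r+v)%base of weight v until a full
--     pass changes nothing, instead of A's per-coefficient cycle walks."""
--     pos = [v for v in coeffs if v > 0]
--     if not pos:
--         return 0, []
--     base = min(pos)
--     dist = [INF] * base
--     dist[0] = 0
--     while True:
--         prev = dist[:]
--         for r in range(base):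
--             for v in pos:
--                 t = (r + v) % base
--                 nd = dist[r] + v
--                 if nd < dist[t]:
--                     dist[t] = nd
--         if dist == prev:
--             break
--     return base, dist
-- ===== Notes on version B (the rewrite author's own statement) =====
-- stated objective: alternative
-- what changed: Replaced A's per-coefficient gcd-cycle two-lap relaxation walks with a Bellman-Ford-style fixpoint loop that relaxes every edge r -> (r+v) % base of the residue graph in full passes until a pass changes nothing.
import Mathlib
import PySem

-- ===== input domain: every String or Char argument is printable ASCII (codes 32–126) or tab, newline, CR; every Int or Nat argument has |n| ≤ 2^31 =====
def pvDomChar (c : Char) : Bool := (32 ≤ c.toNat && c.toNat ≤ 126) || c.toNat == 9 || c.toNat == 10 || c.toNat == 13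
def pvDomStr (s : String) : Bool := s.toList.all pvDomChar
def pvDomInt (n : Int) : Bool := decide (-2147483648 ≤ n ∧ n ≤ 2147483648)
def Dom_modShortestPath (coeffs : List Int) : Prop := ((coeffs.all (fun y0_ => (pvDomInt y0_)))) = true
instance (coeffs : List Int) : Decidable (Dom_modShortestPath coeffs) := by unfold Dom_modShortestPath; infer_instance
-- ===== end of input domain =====

-- B replaces A's per-coefficient gcd-cycle two-lap walks by Bellman-Ford-style
-- full passes over all residue-graph edges repeated to a fixpoint (objective: alternative).

-- ===== PORT A =====
def pvINF : Int := 4000000000000000000   -- INF = int(4e18)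

def pvMin2 (a b : Int) : Int := if a < b then a else b   -- min2

-- the inner `while count < 2` loop of A; fuel only makes it total (it stops, as in
-- Python, when count reaches 2; 2*base+1 steps provably suffice).  All list indices
-- taken are provably in [0, base), so `.toNat` + `getD` is exact here.
def pvLoopA (base v j : Int) : Nat → List Int → Int → Int → List Int
  | 0, dp, _, _ => dp
  | f+1, dp, cur, count =>
    if count < 2 then
      let next := PySem.Int.mod (cur + v) base
      let dp' := dp.set next.toNat (pvMin2 (dp.getD next.toNat 0) (dp.getD cur.toNat 0 + v))
      pvLoopA base v j f dp' next (count + (if next == j then 1 else 0))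
    else dp

def modShortestPath (coeffs : List Int) : Int × List Int :=
  let pos := coeffs.filter (fun v => decide (0 < v))
  if pos.isEmpty then (0, [])
  else
    let base := (PySem.List.min? pos (fun x => x)).getD 0
    let dp0 := (List.replicate base.toNat pvINF).set 0 0
    let dp := pos.foldl (fun dp v =>
      let cycle : Int := Int.gcd base v   -- math.gcd
      (PySem.List.pyRange 0 cycle 1).foldl (fun dp j => pvLoopA base v j ((2*base).toNat + 1) dp j 0) dp) dp0
    (base, dp)

-- ===== PORT B =====
-- one full pass relaxing every edge r -> (r+v) % base; indices provably in [0, base)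
def pvRoundB (base : Int) (pos : List Int) (dp : List Int) : List Int :=
  (PySem.List.pyRange 0 base 1).foldl (fun dp r =>
    pos.foldl (fun dp v =>
      let t := PySem.Int.mod (r + v) base
      let nd := dp.getD r.toNat 0 + v
      if nd < dp.getD t.toNat 0 then dp.set t.toNat nd else dp) dp) dp

-- the `while True` fixpoint loop; fuel only makes it total (each non-final pass
-- strictly decreases the entry sum, so base*INF+2 passes provably suffice)
def pvLoopB (base : Int) (pos : List Int) : Nat → List Int → List Int
  | 0, dp => dp
  | f+1, dp =>
    let dp' := pvRoundB base pos dp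
    if dp' = dp then dp else pvLoopB base pos f dp'

def modShortestPath_alt (coeffs : List Int) : Int × List Int :=
  let pos := coeffs.filter (fun v => decide (0 < v))
  if pos.isEmpty then (0, [])
  else
    let base := (PySem.List.min? pos (fun x => x)).getD 0
    let dp0 := (List.replicate base.toNat pvINF).set 0 0
    (base, pvLoopB base pos ((base * pvINF).toNat + 2) dp0)

-- ===== PRECONDITION & SPEC =====
def Spec_modShortestPath (coeffs : List Int) (out : Int × List Int) : Prop := out = modShortestPath_alt coeffs
instance (coeffs : List Int) (out : Int × List Int) : Decidable (Spec_modShortestPath coeffs out) := by unfold Spec_modShortestPath; infer_instance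

-- ===== CLAIM (what is proved, stated in full; the proofs are below) =====
def Claim_equal_modShortestPath : Prop := ∀ (coeffs : List Int), Dom_modShortestPath coeffs → Spec_modShortestPath coeffs (modShortestPath coeffs)

-- ===== LEMMAS AND PROOFS =====

-- ---------- generic list/order helpers ----------

/-- getD after set, one lemma for all cases. -/
theorem pvGetD_set (dp : List Int) (t t' : Nat) (x : Int) :
    (dp.set t x).getD t' 0 = if t = t' ∧ t < dp.length then x else dp.getD t' 0 := by
  by_cases h : t = t' ∧ t < dp.length
  · rcases h with ⟨h1, h2⟩
    subst h1
    simp [List.getD_eq_getElem?_getD, List.getElem?_set_self, h2]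
  · simp only [if_neg h]
    by_cases h1 : t = t'
    · have h2 : ¬ t < dp.length := fun hc => h ⟨h1, hc⟩
      subst h1
      simp [List.getD_eq_getElem?_getD, List.getElem?_set_self, h2]
    · simp [List.getD_eq_getElem?_getD, List.getElem?_set_ne h1]

theorem pvSet_self (dp : List Int) (t : Nat) (h : t < dp.length) :
    dp.set t (dp.getD t 0) = dp := by
  apply List.ext_getElem (by simp)
  intro i h1 h2
  rw [List.getElem_set]
  split
  · next heq => subst heq; simp [List.getD_eq_getElem?_getD, List.getElem?_eq_getElem h2]
  · rfl

def pvLe (d1 d2 : List Int) : Prop := ∀ t, d1.getD t 0 ≤ d2.getD t 0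

theorem pvLe_refl (d : List Int) : pvLe d d := fun _ => le_refl _

theorem pvLe_trans {d1 d2 d3 : List Int} (h1 : pvLe d1 d2) (h2 : pvLe d2 d3) : pvLe d1 d3 :=
  fun t => le_trans (h1 t) (h2 t)

theorem pvEq_of_le_le {d1 d2 : List Int} (hlen : d1.length = d2.length)
    (h1 : pvLe d1 d2) (h2 : pvLe d2 d1) : d1 = d2 := by
  apply List.ext_getElem hlen
  intro i hi1 hi2
  have e1 : d1.getD i 0 = d1[i] := by
    simp [List.getD_eq_getElem?_getD, List.getElem?_eq_getElem hi1]
  have e2 : d2.getD i 0 = d2[i] := by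
    simp [List.getD_eq_getElem?_getD, List.getElem?_eq_getElem hi2]
  have := le_antisymm (h1 i) (h2 i)
  rw [e1, e2] at this
  exact this

theorem pvGetD_oob (dp : List Int) (t : Nat) (h : dp.length ≤ t) : dp.getD t 0 = 0 := by
  simp [List.getD_eq_getElem?_getD, List.getElem?_eq_none h]

-- ---------- the single relaxation step both programs consist of ----------

/-- relax the edge s → (s+v) % b : dp[(s+v)%b] = min(dp[(s+v)%b], dp[s]+v) -/
def pvRelax (b : Nat) (v : Int) (dp : List Int) (s : Nat) : List Int :=
  if dp.getD s 0 + v < dp.getD ((s + v.toNat) % b) 0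
  then dp.set ((s + v.toNat) % b) (dp.getD s 0 + v) else dp

theorem pvRelax_length (b : Nat) (v : Int) (dp : List Int) (s : Nat) :
    (pvRelax b v dp s).length = dp.length := by
  unfold pvRelax; split <;> simp

theorem pvRelax_le (b : Nat) (v : Int) (dp : List Int) (s : Nat) :
    pvLe (pvRelax b v dp s) dp := by
  intro t
  unfold pvRelax
  split
  · next h =>
    rw [pvGetD_set]
    split
    · next hc => rcases hc with ⟨hc1, _⟩; rw [← hc1]; exact le_of_lt h
    · exact le_refl _
  · exact le_refl _

theorem pvRelax_chain (b : Nat) (v : Int) (dp : List Int) (s : Nat)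
    (hb : 0 < b) (hlen : dp.length = b) :
    (pvRelax b v dp s).getD ((s + v.toNat) % b) 0 ≤ dp.getD s 0 + v := by
  unfold pvRelax
  split
  · next h =>
    rw [pvGetD_set, if_pos ⟨rfl, by rw [hlen]; exact Nat.mod_lt _ hb⟩]
  · next h => omega

theorem pvRelax_id (b : Nat) (v : Int) (dp : List Int) (s : Nat)
    (hb : 0 < b) (hlen : dp.length = b) (h : pvRelax b v dp s = dp) :
    dp.getD ((s + v.toNat) % b) 0 ≤ dp.getD s 0 + v := by
  unfold pvRelax at h
  split at h
  · next hc =>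
    have := congrArg (fun l => l.getD ((s + v.toNat) % b) 0) h
    simp only at this
    rw [pvGetD_set, if_pos ⟨rfl, by rw [hlen]; exact Nat.mod_lt _ hb⟩] at this
    omega
  · next hc => omega

-- ---------- generic fold lemmas ----------

theorem pvFoldl_le {α : Type} (F : List Int → α → List Int) (l : List α) (dp : List Int)
    (h : ∀ dp x, x ∈ l → pvLe (F dp x) dp) : pvLe (List.foldl F dp l) dp := by
  induction l generalizing dp with
  | nil => exact pvLe_refl _
  | cons x rest ih =>
    simp only [List.foldl_cons]
    exact pvLe_trans (ih _ (fun dp y hy => h dp y (List.mem_cons_of_mem _ hy)))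
      (h dp x List.mem_cons_self)

theorem pvFoldl_pres {α : Type} (P : List Int → Prop) (F : List Int → α → List Int)
    (l : List α) (dp : List Int) (hdp : P dp)
    (h : ∀ dp x, x ∈ l → P dp → P (F dp x)) : P (List.foldl F dp l) := by
  induction l generalizing dp with
  | nil => exact hdp
  | cons x rest ih =>
    exact ih _ (h dp x List.mem_cons_self hdp)
      (fun dp y hy hp => h dp y (List.mem_cons_of_mem _ hy) hp)

theorem pvFoldl_congr_inv {α : Type} (P : List Int → Prop) (F G : List Int → α → List Int)
    (l : List α) (dp : List Int) (hdp : P dp)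
    (h : ∀ dp x, x ∈ l → P dp → F dp x = G dp x)
    (hP : ∀ dp x, x ∈ l → P dp → P (G dp x)) :
    List.foldl F dp l = List.foldl G dp l := by
  induction l generalizing dp with
  | nil => rfl
  | cons x rest ih =>
    simp only [List.foldl_cons]
    rw [h dp x List.mem_cons_self hdp]
    exact ih _ (hP dp x List.mem_cons_self hdp)
      (fun dp y hy hp => h dp y (List.mem_cons_of_mem _ hy) hp)
      (fun dp y hy hp => hP dp y (List.mem_cons_of_mem _ hy) hp)

theorem pvFoldId {α : Type} (F : List Int → α → List Int) (l : List α) (dp : List Int)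
    (hm : ∀ dp x, x ∈ l → pvLe (F dp x) dp)
    (hlen : ∀ dp x, x ∈ l → (F dp x).length = dp.length)
    (h : List.foldl F dp l = dp) : ∀ x ∈ l, F dp x = dp := by
  induction l with
  | nil => intro x hx; cases hx
  | cons y rest ih =>
    simp only [List.foldl_cons] at h
    have hfle : pvLe (List.foldl F (F dp y) rest) (F dp y) :=
      pvFoldl_le _ _ _ (fun dp x hx => hm dp x (List.mem_cons_of_mem _ hx))
    have h1 : F dp y = dp := by
      apply pvEq_of_le_le (hlen dp y List.mem_cons_self)
        (hm dp y List.mem_cons_self)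
      intro t
      have hx := hfle t
      rw [h] at hx
      exact hx
    intro x hx
    rcases List.mem_cons.mp hx with hx | hx
    · subst hx; exact h1
    · exact ih (fun dp z hz => hm dp z (List.mem_cons_of_mem _ hz))
        (fun dp z hz => hlen dp z (List.mem_cons_of_mem _ hz))
        (by rw [h1] at h; exact h) x hx

theorem pvFoldl_cover {α : Type} (b : Nat) (F : List Int → α → List Int) (l : List α)
    (x : α) (hx : x ∈ l)
    (hmono : ∀ dp y, y ∈ l → pvLe (F dp y) dp)
    (hlenF : ∀ dp y, y ∈ l → (F dp y).length = dp.length)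
    (T j0 : Nat) (C : Int)
    (hkey : ∀ dp, dp.length = b → (F dp x).getD T 0 ≤ dp.getD j0 0 + C) :
    ∀ dp, dp.length = b → (List.foldl F dp l).getD T 0 ≤ dp.getD j0 0 + C := by
  induction l with
  | nil => cases hx
  | cons y rest ih =>
    intro dp hdp
    simp only [List.foldl_cons]
    rcases List.mem_cons.mp hx with hxy | hxr
    · subst hxy
      have h1 := hkey dp hdp
      have h2 : pvLe (List.foldl F (F dp x) rest) (F dp x) :=
        pvFoldl_le _ _ _ (fun dp z hz => hmono dp z (List.mem_cons_of_mem _ hz))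
      exact le_trans (h2 T) h1
    · have hlen1 : (F dp y).length = b := by rw [hlenF dp y List.mem_cons_self, hdp]
      have := ih hxr (fun dp z hz => hmono dp z (List.mem_cons_of_mem _ hz))
        (fun dp z hz => hlenF dp z (List.mem_cons_of_mem _ hz)) (F dp y) hlen1
      exact le_trans this (by
        have := hmono dp y List.mem_cons_self j0
        omega)

-- ---------- modular arithmetic bridges ----------

theorem pvEmod_addNat (x : Int) (base : Int) (w : Nat) (hb : 0 < base) :
    (x + (w : Int)) % base = ((((x % base).toNat + w) % base.toNat : Nat) : Int) := by
  have hb0 : base ≠ 0 := hb.ne'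
  have h0 : 0 ≤ x % base := Int.emod_nonneg x hb0
  have h1 : (x + (w : Int)) % base = (x % base + (w : Int)) % base := by
    conv_lhs => rw [Int.add_emod]
    conv_rhs => rw [Int.add_emod, Int.emod_emod_of_dvd x dvd_rfl]
  rw [h1]
  rw [show x % base = (((x % base).toNat : Nat) : Int) from (Int.toNat_of_nonneg h0).symm]
  rw [show base = ((base.toNat : Nat) : Int) from (Int.toNat_of_nonneg hb.le).symm]
  push_cast
  rfl

theorem pvEmod_toNat_lt (x base : Int) (hb : 0 < base) : (x % base).toNat < base.toNat := by
  have h1 : 0 ≤ x % base := Int.emod_nonneg x hb.ne'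
  have h2 : x % base < base := Int.emod_lt_of_pos x hb
  omega

theorem pvModCast (rn : Nat) (v base : Int) (hb : 0 < base) (hv : 0 ≤ v) :
    PySem.Int.mod ((rn : Int) + v) base = (((rn + v.toNat) % base.toNat : Nat) : Int) := by
  rw [PySem.Int.mod_eq_emod_of_pos hb]
  rw [show v = ((v.toNat : Nat) : Int) from (Int.toNat_of_nonneg hv).symm]
  rw [show base = ((base.toNat : Nat) : Int) from (Int.toNat_of_nonneg hb.le).symm]
  push_cast
  rfl

-- ---------- soundness invariant: every entry is INF or a representable sum ----------

def pvInv (base : Int) (pos dp : List Int) : Prop :=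
  dp.length = base.toNat ∧ ∀ t, t < base.toNat →
    0 ≤ dp.getD t 0 ∧ dp.getD t 0 ≤ pvINF ∧
    (dp.getD t 0 = pvINF ∨ ∃ l : List Int, (∀ y ∈ l, y ∈ pos) ∧
        l.sum = dp.getD t 0 ∧ l.sum % base = (t : Int))

theorem pvRelax_inv (base : Int) (pos dp : List Int) (v : Int) (s : Nat)
    (hb : 0 < base) (hv : v ∈ pos) (hvp : 0 < v) (hs : s < base.toNat)
    (h : pvInv base pos dp) : pvInv base pos (pvRelax base.toNat v dp s) := by
  obtain ⟨hlen, hent⟩ := h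
  have hbn : 0 < base.toNat := by omega
  unfold pvRelax
  split
  · next hc =>
    set t0 := (s + v.toNat) % base.toNat with ht0
    have ht0b : t0 < base.toNat := Nat.mod_lt _ hbn
    refine ⟨by simp [hlen], ?_⟩
    intro t ht
    rw [pvGetD_set]
    by_cases he : t0 = t ∧ t0 < dp.length
    · rw [if_pos he]
      rcases he with ⟨he1, _⟩
      obtain ⟨hs0, hs1, hs2⟩ := hent s hs
      obtain ⟨ha0, ha1, _⟩ := hent t0 ht0b
      refine ⟨by omega, by omega, ?_⟩
      right
      rcases hs2 with hINF | ⟨l, hl1, hl2, hl3⟩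
      · exfalso; omega
      · refine ⟨l ++ [v], ?_, ?_, ?_⟩
        · intro y hy
          rcases List.mem_append.mp hy with hy | hy
          · exact hl1 y hy
          · simp at hy; subst hy; exact hv
        · simp [hl2]
        · rw [List.sum_append, List.sum_singleton, hl2]
          rw [show v = ((v.toNat : Nat) : Int) from (Int.toNat_of_nonneg hvp.le).symm]
          rw [pvEmod_addNat _ _ _ hb]
          have hres : ((dp.getD s 0) % base).toNat = s := by
            rw [← hl2, hl3]; simp
          rw [hres, ← ht0, he1]
    · rw [if_neg he]
      exact hent t ht
  · exact ⟨hlen, hent⟩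

-- ---------- B side: a fixpoint of a full pass bounds every representable sum ----------

def pvFix (b : Nat) (pos dp : List Int) : Prop :=
  ∀ s, s < b → ∀ v ∈ pos, dp.getD ((s + v.toNat) % b) 0 ≤ dp.getD s 0 + v

theorem pvComp_of_fix (base : Int) (pos dp : List Int) (hb : 0 < base)
    (hpos : ∀ v ∈ pos, 0 < v) (hfix : pvFix base.toNat pos dp)
    (h0 : dp.getD 0 0 ≤ 0) :
    ∀ l : List Int, (∀ y ∈ l, y ∈ pos) →
      dp.getD ((l.sum % base).toNat) 0 ≤ l.sum := by
  intro l
  induction l using List.reverseRecOn with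
  | nil => intro _; simpa using h0
  | append_singleton l y ih =>
    intro hmem
    have hy : y ∈ pos := hmem y (List.mem_append.mpr (Or.inr (by simp)))
    have hyp : 0 < y := hpos y hy
    have hl : ∀ z ∈ l, z ∈ pos := fun z hz => hmem z (List.mem_append.mpr (Or.inl hz))
    have ihl := ih hl
    set s := (l.sum % base).toNat with hsdef
    have hs : s < base.toNat := pvEmod_toNat_lt _ _ hb
    have hstep := hfix s hs y hy
    have hres : (((l ++ [y]).sum) % base).toNat = (s + y.toNat) % base.toNat := by
      rw [List.sum_append, List.sum_singleton]
      conv_lhs => rw [show y = ((y.toNat : Nat) : Int) from (Int.toNat_of_nonneg hyp.le).symm]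
      rw [pvEmod_addNat _ _ _ hb]
      simp only [Int.toNat_natCast]
      rw [← hsdef]
    rw [hres, List.sum_append, List.sum_singleton]
    omega

-- ---------- sums of toNat entries: the termination measure of B's while loop ----------

def pvSum (dp : List Int) : Nat := (dp.map Int.toNat).sum

theorem pvSum_le (d1 d2 : List Int) (hlen : d1.length = d2.length)
    (hle : pvLe d1 d2) : pvSum d1 ≤ pvSum d2 := by
  induction d1 generalizing d2 with
  | nil => cases d2 with
    | nil => exact le_refl _
    | cons y t => simp at hlen
  | cons x t1 ih =>
    cases d2 with
    | nil => simp at hlen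
    | cons y t2 =>
      have hhead : x ≤ y := by have := hle 0; simpa using this
      have htail : pvLe t1 t2 := by
        intro t; have := hle (t + 1); simpa using this
      have := ih t2 (by simpa using hlen) htail
      simp only [pvSum, List.map_cons, List.sum_cons]
      have : x.toNat ≤ y.toNat := by omega
      have h2 := ih t2 (by simpa using hlen) htail
      simp only [pvSum] at h2
      omega

theorem pvSum_lt (d1 d2 : List Int) (hlen : d1.length = d2.length)
    (hle : pvLe d1 d2) (hne : d1 ≠ d2)
    (hnn : ∀ t, t < d1.length → 0 ≤ d1.getD t 0) : pvSum d1 < pvSum d2 := by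
  induction d1 generalizing d2 with
  | nil =>
    cases d2 with
    | nil => exact absurd rfl hne
    | cons y t => simp at hlen
  | cons x t1 ih =>
    cases d2 with
    | nil => simp at hlen
    | cons y t2 =>
      have hhead : x ≤ y := by have := hle 0; simpa using this
      have htail : pvLe t1 t2 := by
        intro t; have := hle (t + 1); simpa using this
      have hlent : t1.length = t2.length := by simpa using hlen
      have hx0 : 0 ≤ x := by have := hnn 0 (by simp); simpa using this
      have htnn : ∀ t, t < t1.length → 0 ≤ t1.getD t 0 := by
        intro t ht
        have := hnn (t + 1) (by simp; omega)
        simpa using this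
      simp only [pvSum, List.map_cons, List.sum_cons]
      by_cases hxy : x = y
      · subst hxy
        have hne' : t1 ≠ t2 := by
          intro hcon; exact hne (by rw [hcon])
        have := ih t2 hlent htail hne' htnn
        simp only [pvSum] at this
        omega
      · have h1 : x.toNat < y.toNat := by omega
        have h2 := pvSum_le t1 t2 hlent htail
        simp only [pvSum] at h2
        omega

-- ---------- B's pass and while-loop, rewritten to pvRelax folds ----------

theorem pvFoldl_length {α : Type} (F : List Int → α → List Int) (l : List α) (dp : List Int)
    (h : ∀ dp x, x ∈ l → (F dp x).length = dp.length) :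
    (List.foldl F dp l).length = dp.length :=
  pvFoldl_pres (fun d => d.length = dp.length) F l dp rfl
    (fun d x hx hP => by
      show (F d x).length = dp.length
      rw [h d x hx]; exact hP)

theorem pvRoundB_eq (base : Int) (pos dp : List Int) (hb : 0 < base)
    (hpos : ∀ v ∈ pos, 0 < v) :
    pvRoundB base pos dp =
      List.foldl (fun dp rn => List.foldl (fun dp v => pvRelax base.toNat v dp rn) dp pos)
        dp (List.range base.toNat) := by
  unfold pvRoundB
  rw [PySem.List.pyRange_one]
  simp only [sub_zero, zero_add, Int.toNat_natCast]
  rw [List.foldl_map]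
  refine pvFoldl_congr_inv (fun _ => True) _ _ _ _ trivial ?_ (fun _ _ _ _ => trivial)
  intro dp rn _ _
  refine pvFoldl_congr_inv (fun _ => True) _ _ _ _ trivial ?_ (fun _ _ _ _ => trivial)
  intro dp v hv _
  have h1 := pvModCast rn v base hb (hpos v hv).le
  simp only [h1, pvRelax, Int.toNat_natCast]

theorem pvRoundB_le (base : Int) (pos dp : List Int) (hb : 0 < base)
    (hpos : ∀ v ∈ pos, 0 < v) : pvLe (pvRoundB base pos dp) dp := by
  rw [pvRoundB_eq base pos dp hb hpos]
  exact pvFoldl_le _ _ _ (fun dp rn _ => pvFoldl_le _ _ _ (fun dp v _ => pvRelax_le _ _ _ _))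

theorem pvRoundB_inv (base : Int) (pos dp : List Int) (hb : 0 < base)
    (hpos : ∀ v ∈ pos, 0 < v) (h : pvInv base pos dp) :
    pvInv base pos (pvRoundB base pos dp) := by
  rw [pvRoundB_eq base pos dp hb hpos]
  refine pvFoldl_pres (pvInv base pos) _ _ _ h ?_
  intro dp rn hrn hinv
  refine pvFoldl_pres (pvInv base pos) _ _ _ hinv ?_
  intro dp v hv hinv2
  exact pvRelax_inv base pos dp v rn hb hv (hpos v hv) (List.mem_range.mp hrn) hinv2

theorem pvFix_of_roundB (base : Int) (pos dp : List Int) (hb : 0 < base)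
    (hpos : ∀ v ∈ pos, 0 < v) (hlen : dp.length = base.toNat)
    (h : pvRoundB base pos dp = dp) : pvFix base.toNat pos dp := by
  rw [pvRoundB_eq base pos dp hb hpos] at h
  intro s hs v hv
  have houter := pvFoldId _ (List.range base.toNat) dp
    (fun dp rn _ => pvFoldl_le _ _ _ (fun dp v _ => pvRelax_le _ _ _ _))
    (fun dp rn _ => pvFoldl_length _ _ _ (fun dp v _ => pvRelax_length _ _ _ _))
    h s (List.mem_range.mpr hs)
  have hinner := pvFoldId (fun dp v => pvRelax base.toNat v dp s) pos dp
    (fun dp v _ => pvRelax_le _ _ _ _)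
    (fun dp v _ => pvRelax_length _ _ _ _)
    houter v hv
  exact pvRelax_id _ _ _ _ (by omega) hlen hinner

theorem pvLoopB_succ (base : Int) (pos : List Int) (f : Nat) (dp : List Int) :
    pvLoopB base pos (f + 1) dp =
      if pvRoundB base pos dp = dp then dp
      else pvLoopB base pos f (pvRoundB base pos dp) := rfl

theorem pvLoopB_spec (base : Int) (pos : List Int) (hb : 0 < base)
    (hpos : ∀ v ∈ pos, 0 < v) :
    ∀ f dp, pvInv base pos dp → pvSum dp < f →
      pvRoundB base pos (pvLoopB base pos f dp) = pvLoopB base pos f dp ∧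
      pvLe (pvLoopB base pos f dp) dp ∧ pvInv base pos (pvLoopB base pos f dp) := by
  intro f
  induction f with
  | zero => intro dp _ hf; omega
  | succ f ih =>
    intro dp hinv hf
    rw [pvLoopB_succ]
    by_cases hE : pvRoundB base pos dp = dp
    · rw [if_pos hE]
      exact ⟨hE, pvLe_refl _, hinv⟩
    · rw [if_neg hE]
      have hinv' := pvRoundB_inv base pos dp hb hpos hinv
      have hle' := pvRoundB_le base pos dp hb hpos
      have hlen' : (pvRoundB base pos dp).length = dp.length := by
        rw [hinv'.1, hinv.1]
      have hnn : ∀ t, t < (pvRoundB base pos dp).length → 0 ≤ (pvRoundB base pos dp).getD t 0 := by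
        intro t ht
        rw [hinv'.1] at ht
        exact (hinv'.2 t ht).1
      have hsum : pvSum (pvRoundB base pos dp) < pvSum dp :=
        pvSum_lt _ _ hlen' hle' hE hnn
      obtain ⟨h1, h2, h3⟩ := ih (pvRoundB base pos dp) hinv' (by omega)
      exact ⟨h1, pvLe_trans h2 hle', h3⟩

-- ---------- A side: the cycle walks, their characterization and coverage ----------

def pvWalk (b : Nat) (v : Int) : List Int → Nat → Nat → List Int
  | dp, _, 0 => dp
  | dp, s, m+1 => pvWalk b v (pvRelax b v dp s) ((s + v.toNat) % b) m

theorem pvWalk_length (b : Nat) (v : Int) :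
    ∀ m s dp, (pvWalk b v dp s m).length = dp.length := by
  intro m
  induction m with
  | zero => intro s dp; rfl
  | succ m ih =>
    intro s dp
    show (pvWalk b v (pvRelax b v dp s) ((s + v.toNat) % b) m).length = _
    rw [ih, pvRelax_length]

theorem pvWalk_le (b : Nat) (v : Int) :
    ∀ m s dp, pvLe (pvWalk b v dp s m) dp := by
  intro m
  induction m with
  | zero => intro s dp; exact pvLe_refl _
  | succ m ih =>
    intro s dp
    exact pvLe_trans (ih ((s + v.toNat) % b) (pvRelax b v dp s)) (pvRelax_le _ _ _ _)

theorem pvWalk_inv (base : Int) (pos : List Int) (v : Int) (hb : 0 < base)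
    (hv : v ∈ pos) (hvp : 0 < v) :
    ∀ m s dp, s < base.toNat → pvInv base pos dp →
      pvInv base pos (pvWalk base.toNat v dp s m) := by
  intro m
  induction m with
  | zero => intro s dp _ h; exact h
  | succ m ih =>
    intro s dp hs h
    show pvInv base pos (pvWalk base.toNat v (pvRelax base.toNat v dp s) ((s + v.toNat) % base.toNat) m)
    exact ih _ _ (Nat.mod_lt _ (by omega)) (pvRelax_inv base pos dp v s hb hv hvp hs h)

theorem pvWalk_split (b : Nat) (v : Int) (hb : 0 < b) :
    ∀ m n s dp, s < b → pvWalk b v dp s (m + n) =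
      pvWalk b v (pvWalk b v dp s m) ((s + m * v.toNat) % b) n := by
  intro m
  induction m with
  | zero =>
    intro n s dp hs
    simp [pvWalk, Nat.mod_eq_of_lt hs]
  | succ m ih =>
    intro n s dp hs
    have h1 : m + 1 + n = (m + n) + 1 := by omega
    rw [h1]
    show pvWalk b v (pvRelax b v dp s) ((s + v.toNat) % b) (m + n) = _
    rw [ih n ((s + v.toNat) % b) (pvRelax b v dp s) (Nat.mod_lt _ hb)]
    have h2 : ((s + v.toNat) % b + m * v.toNat) % b = (s + (m + 1) * v.toNat) % b := by
      rw [Nat.mod_add_mod]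
      ring_nf
    rw [h2]
    rfl

theorem pvWalk_chain (b : Nat) (v : Int) (hb : 0 < b) :
    ∀ k m s dp, k ≤ m → s < b → dp.length = b →
      (pvWalk b v dp s m).getD ((s + k * v.toNat) % b) 0 ≤ dp.getD s 0 + (k : Int) * v := by
  intro k
  induction k with
  | zero =>
    intro m s dp _ hs _
    have h1 : (s + 0 * v.toNat) % b = s := by simp [Nat.mod_eq_of_lt hs]
    rw [h1]
    simpa using pvWalk_le b v m s dp s
  | succ k ih =>
    intro m s dp hk hs hlen
    cases m with
    | zero => omega
    | succ m =>
      show (pvWalk b v (pvRelax b v dp s) ((s + v.toNat) % b) m).getD _ 0 ≤ _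
      have hpos : ((s + v.toNat) % b + k * v.toNat) % b = (s + (k + 1) * v.toNat) % b := by
        rw [Nat.mod_add_mod]
        ring_nf
      have h1 := ih m ((s + v.toNat) % b) (pvRelax b v dp s) (by omega) (Nat.mod_lt _ hb)
        (by rw [pvRelax_length, hlen])
      rw [hpos] at h1
      have h2 := pvRelax_chain b v dp s hb hlen
      have : ((k : Int) + 1) * v = (k : Int) * v + v := by ring
      push_cast
      push_cast at h1
      nlinarith [h1, h2]

-- ---------- arithmetic of the gcd cycles ----------

theorem pvDvd_L (b vn : Nat) (hb : 0 < b) (t : Nat) :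
    b ∣ t * vn ↔ (b / Nat.gcd b vn) ∣ t := by
  set g := Nat.gcd b vn with hg
  have hgpos : 0 < g := Nat.gcd_pos_of_pos_left vn hb
  have hgb : g ∣ b := Nat.gcd_dvd_left b vn
  have hgv : g ∣ vn := Nat.gcd_dvd_right b vn
  have hco : Nat.Coprime (b / g) (vn / g) := Nat.coprime_div_gcd_div_gcd hgpos
  have hb' : b = g * (b / g) := (Nat.mul_div_cancel' hgb).symm
  have hv' : vn = g * (vn / g) := (Nat.mul_div_cancel' hgv).symm
  constructor
  · intro h
    have h1 : g * (b / g) ∣ g * (t * (vn / g)) := by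
      rw [show g * (t * (vn / g)) = t * vn by
        conv_rhs => rw [hv']
        ring]
      rw [← hb']
      exact h
    have h2 : (b / g) ∣ t * (vn / g) := (Nat.mul_dvd_mul_iff_left hgpos).mp h1
    exact (Nat.Coprime.dvd_of_dvd_mul_right hco) h2
  · intro h
    obtain ⟨c, hc⟩ := h
    rw [hc]
    refine ⟨c * (vn / g), ?_⟩
    rw [show b / g * c * vn = (b / g) * (vn) * c by ring]
    conv_lhs => rw [hv']
    rw [show b / g * (g * (vn / g)) * c = (g * (b / g)) * (vn / g) * c by ring]
    rw [← hb']
    ring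

theorem pvOcc (b vn j : Nat) (hb : 0 < b) (hj : j < b) (t : Nat) :
    ((j + t * vn) % b = j) ↔ b ∣ t * vn := by
  constructor
  · intro h
    have h1 : (j + t * vn) % b = j % b := by rw [h, Nat.mod_eq_of_lt hj]
    have h2 : j ≡ j + t * vn [MOD b] := by
      unfold Nat.ModEq
      rw [h1, Nat.mod_eq_of_lt hj]
    have := (Nat.modEq_iff_dvd' (by omega)).mp h2
    simpa using this
  · intro h
    obtain ⟨c, hc⟩ := h
    rw [hc, Nat.add_mul_mod_self_left, Nat.mod_eq_of_lt hj]

theorem pvKred (b vn : Nat) (hb : 0 < b) (j0 k : Nat) :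
    (j0 + k * vn) % b = (j0 + (k % (b / Nat.gcd b vn)) * vn) % b := by
  set g := Nat.gcd b vn with hg
  set L := b / g with hL
  have hgv : g ∣ vn := Nat.gcd_dvd_right b vn
  have hgb : g ∣ b := Nat.gcd_dvd_left b vn
  have hbL : b ∣ L * vn := by
    obtain ⟨w, hw⟩ := hgv
    refine ⟨w, ?_⟩
    rw [hw, hL]
    rw [show b / g * (g * w) = (g * (b / g)) * w by ring]
    rw [Nat.mul_div_cancel' hgb]
  obtain ⟨e, he⟩ := hbL
  have hk : k = L * (k / L) + k % L := (Nat.div_add_mod k L).symm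
  calc (j0 + k * vn) % b = (j0 + (L * (k / L) + k % L) * vn) % b := by rw [← hk]
    _ = ((j0 + (k % L) * vn) + b * (e * (k / L))) % b := by
        congr 1
        rw [show (L * (k / L) + k % L) * vn = (k % L) * vn + (L * vn) * (k / L) by ring, he]
        ring
    _ = (j0 + (k % L) * vn) % b := Nat.add_mul_mod_self_left _ _ _

theorem pvSurj (b vn j j0 : Nat) (hb : 0 < b) (hv : 0 < vn)
    (hj : j < Nat.gcd b vn) (h0 : j0 < b) (hr : j0 % Nat.gcd b vn = j) :
    ∃ t, t < b / Nat.gcd b vn ∧ (j + t * vn) % b = j0 := by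
  set g := Nat.gcd b vn with hg
  set L := b / g with hL
  have hgpos : 0 < g := Nat.gcd_pos_of_pos_left vn hb
  have hgb : g ∣ b := Nat.gcd_dvd_left b vn
  have hgv : g ∣ vn := Nat.gcd_dvd_right b vn
  have hjb : j < b := lt_of_lt_of_le hj (Nat.le_of_dvd hb hgb)
  have hLpos : 0 < L := Nat.div_pos (Nat.le_of_dvd hb hgb) hgpos
  have hbgL : g * L = b := Nat.mul_div_cancel' hgb
  -- injectivity of t ↦ (j + t*vn) % b on range L
  have hinj : Set.InjOn (fun t => (j + t * vn) % b) ↑(Finset.range L) := by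
    have haux : ∀ t t', t < L → t' < L → t' ≤ t →
        (j + t * vn) % b = (j + t' * vn) % b → t = t' := by
      intro t t' ht ht' hle heq
      have h1 : j + t' * vn ≡ j + t * vn [MOD b] := by
        unfold Nat.ModEq; omega
      have h2 := (Nat.modEq_iff_dvd' (by
        have : t' * vn ≤ t * vn := Nat.mul_le_mul_right vn hle
        omega)).mp h1
      have h3 : j + t * vn - (j + t' * vn) = (t - t') * vn := by
        rw [Nat.sub_mul]; omega
      rw [h3] at h2
      have h4 : L ∣ (t - t') := (pvDvd_L b vn hb (t - t')).mp h2
      have h5 : t - t' < L := by omega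
      have h6 : t - t' = 0 := by
        rcases Nat.eq_zero_or_pos (t - t') with h | h
        · exact h
        · exact absurd (Nat.le_of_dvd h h4) (by omega)
      omega
    intro t ht t' ht' heq
    simp only [Finset.coe_range, Set.mem_Iio] at ht ht'
    rcases le_total t' t with hle | hle
    · exact haux t t' ht ht' hle heq
    · exact (haux t' t ht' ht hle heq.symm).symm
  have hcardA : (Finset.image (fun t => (j + t * vn) % b) (Finset.range L)).card = L := by
    rw [Finset.card_image_of_injOn hinj, Finset.card_range]
  have hsubT : Finset.image (fun t => (j + t * vn) % b) (Finset.range L) ⊆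
      (Finset.range b).filter (fun r => r % g = j) := by
    intro r hrmem
    obtain ⟨t, _, hteq⟩ := Finset.mem_image.mp hrmem
    rw [Finset.mem_filter, Finset.mem_range]
    constructor
    · rw [← hteq]; exact Nat.mod_lt _ hb
    · rw [← hteq]
      rw [Nat.mod_mod_of_dvd _ hgb]
      obtain ⟨w, hw⟩ := hgv
      rw [hw, show j + t * (g * w) = j + g * (t * w) by ring, Nat.add_mul_mod_self_left,
        Nat.mod_eq_of_lt hj]
  have hsubB : (Finset.range b).filter (fun r => r % g = j) ⊆
      Finset.image (fun m => g * m + j) (Finset.range L) := by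
    intro r hrmem
    rw [Finset.mem_filter, Finset.mem_range] at hrmem
    obtain ⟨hrb, hrg⟩ := hrmem
    rw [Finset.mem_image]
    refine ⟨r / g, ?_, ?_⟩
    · rw [Finset.mem_range]
      have : r / g < b / g := Nat.div_lt_div_of_lt_of_dvd hgb hrb
      exact this
    · have := Nat.div_add_mod r g
      omega
  have hcardT : ((Finset.range b).filter (fun r => r % g = j)).card ≤ L := by
    calc ((Finset.range b).filter (fun r => r % g = j)).card
        ≤ (Finset.image (fun m => g * m + j) (Finset.range L)).card := Finset.card_le_card hsubB
      _ ≤ L := le_trans Finset.card_image_le (by rw [Finset.card_range])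
  have hAeqT : Finset.image (fun t => (j + t * vn) % b) (Finset.range L) =
      (Finset.range b).filter (fun r => r % g = j) := by
    apply Finset.eq_of_subset_of_card_le hsubT
    rw [hcardA]; exact hcardT
  have hj0T : j0 ∈ (Finset.range b).filter (fun r => r % g = j) := by
    rw [Finset.mem_filter, Finset.mem_range]; exact ⟨h0, hr⟩
  rw [← hAeqT] at hj0T
  obtain ⟨t, htL, hteq⟩ := Finset.mem_image.mp hj0T
  exact ⟨t, Finset.mem_range.mp htL, hteq⟩

-- ---------- A's while loop is exactly a 2-lap walk of its cycle ----------

theorem pvMinSet_eq_relax (b : Nat) (v : Int) (dp : List Int) (s : Nat)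
    (hb : 0 < b) (hlen : dp.length = b) :
    dp.set ((s + v.toNat) % b)
      (pvMin2 (dp.getD ((s + v.toNat) % b) 0) (dp.getD s 0 + v)) = pvRelax b v dp s := by
  have htlt : (s + v.toNat) % b < dp.length := by rw [hlen]; exact Nat.mod_lt _ hb
  unfold pvMin2 pvRelax
  by_cases h : dp.getD ((s + v.toNat) % b) 0 < dp.getD s 0 + v
  · rw [if_pos h, if_neg (by omega), pvSet_self _ _ htlt]
  · rw [if_neg h]
    by_cases h2 : dp.getD s 0 + v < dp.getD ((s + v.toNat) % b) 0
    · rw [if_pos h2]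
    · rw [if_neg h2]
      have : dp.getD s 0 + v = dp.getD ((s + v.toNat) % b) 0 := by omega
      rw [this, pvSet_self _ _ htlt]

theorem pvLoopA_walk (b vn j : Nat) (hb : 0 < b) (hv : 0 < vn)
    (hj : j < Nat.gcd b vn) :
    ∀ f t dp, dp.length = b → t ≤ 2 * (b / Nat.gcd b vn) →
      2 * (b / Nat.gcd b vn) - t < f →
      pvLoopA (b : Int) (vn : Int) (j : Int) f dp (((j + t * vn) % b : Nat) : Int)
        ((t / (b / Nat.gcd b vn) : Nat) : Int)
      = pvWalk b (vn : Int) dp ((j + t * vn) % b) (2 * (b / Nat.gcd b vn) - t) := by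
  set g := Nat.gcd b vn with hg
  set L := b / g with hL
  have hgpos : 0 < g := Nat.gcd_pos_of_pos_left vn hb
  have hgb : g ∣ b := Nat.gcd_dvd_left b vn
  have hjb : j < b := lt_of_lt_of_le hj (Nat.le_of_dvd hb hgb)
  have hLpos : 0 < L := Nat.div_pos (Nat.le_of_dvd hb hgb) hgpos
  intro f
  induction f with
  | zero => intro t dp _ _ hf; omega
  | succ f ih =>
    intro t dp hlen ht hf
    show (if ((t / L : Nat) : Int) < 2 then _ else _) = _
    by_cases hcase : t < 2 * L
    · have hcount : t / L < 2 := by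
        rw [Nat.div_lt_iff_lt_mul hLpos]; omega
      rw [if_pos (by exact_mod_cast hcount)]
      have hnext : PySem.Int.mod ((((j + t * vn) % b : Nat) : Int) + (vn : Int)) (b : Int)
          = (((j + (t + 1) * vn) % b : Nat) : Int) := by
        rw [pvModCast _ _ _ (by exact_mod_cast hb) (by positivity)]
        congr 1
        simp only [Int.toNat_natCast]
        rw [Nat.mod_add_mod]
        ring_nf
      simp only [hnext, Int.toNat_natCast]
      have hrelax : dp.set ((j + (t + 1) * vn) % b)
          (pvMin2 (dp.getD ((j + (t + 1) * vn) % b) 0)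
            (dp.getD ((j + t * vn) % b) 0 + (vn : Int)))
          = pvRelax b (vn : Int) dp ((j + t * vn) % b) := by
        have h1 : ((j + t * vn) % b + ((vn : Int)).toNat) % b = (j + (t + 1) * vn) % b := by
          simp only [Int.toNat_natCast]
          rw [Nat.mod_add_mod]; ring_nf
        rw [← h1]
        exact pvMinSet_eq_relax b (vn : Int) dp ((j + t * vn) % b) hb hlen
      rw [hrelax]
      have hcnt : (((t / L : Nat) : Int) + if (((j + (t + 1) * vn) % b : Nat) : Int) == (j : Int) then 1 else 0)
          = (((t + 1) / L : Nat) : Int) := by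
        have hocc : ((j + (t + 1) * vn) % b = j) ↔ L ∣ (t + 1) := by
          rw [pvOcc b vn j hb hjb (t + 1), pvDvd_L b vn hb]
        rw [Nat.succ_div]
        by_cases hd : L ∣ (t + 1)
        · rw [if_pos (by
            simp only [beq_iff_eq, Int.natCast_inj]
            exact hocc.mpr hd)]
          rw [if_pos hd]
          push_cast; ring
        · rw [if_neg (by
            simp only [beq_iff_eq, Int.natCast_inj]
            exact fun hcon => hd (hocc.mp hcon))]
          rw [if_neg hd]
          push_cast; ring
      rw [hcnt]
      have hstep := ih (t + 1) (pvRelax b (vn : Int) dp ((j + t * vn) % b))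
        (by rw [pvRelax_length, hlen]) (by omega) (by omega)
      rw [hstep]
      have hm : 2 * L - t = (2 * L - (t + 1)) + 1 := by omega
      rw [hm]
      show _ = pvWalk b (vn : Int) (pvRelax b (vn : Int) dp ((j + t * vn) % b))
        (((j + t * vn) % b + ((vn : Int)).toNat) % b) (2 * L - (t + 1))
      congr 1
      simp only [Int.toNat_natCast]
      rw [Nat.mod_add_mod]; ring_nf
    · have ht2 : t = 2 * L := by omega
      have hcount : t / L = 2 := by rw [ht2, Nat.mul_div_cancel _ hLpos]
      rw [if_neg (by rw [hcount]; norm_num)]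
      rw [ht2]
      simp [pvWalk]

-- ---------- coverage: one 2-lap walk serves every start on its cycle ----------

theorem pvWalk_cover (b vn : Nat) (hb : 0 < b) (hv : 0 < vn)
    (j j0 : Nat) (hj : j < Nat.gcd b vn) (h0 : j0 < b)
    (hr : j0 % Nat.gcd b vn = j) (k : Nat) (hk : k < b / Nat.gcd b vn)
    (dp : List Int) (hlen : dp.length = b) :
    (pvWalk b (vn : Int) dp j (2 * (b / Nat.gcd b vn))).getD ((j0 + k * vn) % b) 0
      ≤ dp.getD j0 0 + (k : Int) * (vn : Int) := by
  obtain ⟨t0, ht0L, ht0eq⟩ := pvSurj b vn j j0 hb hv hj h0 hr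
  have hjb : j < b := lt_of_lt_of_le hj (Nat.le_of_dvd hb (Nat.gcd_dvd_left b vn))
  have hsplit : 2 * (b / Nat.gcd b vn) = t0 + (2 * (b / Nat.gcd b vn) - t0) := by omega
  rw [hsplit, pvWalk_split b (vn : Int) hb t0 _ j dp hjb]
  have hpos : (j + t0 * ((vn : Int)).toNat) % b = j0 := by
    simpa using ht0eq
  rw [hpos]
  have hchain := pvWalk_chain b (vn : Int) hb k (2 * (b / Nat.gcd b vn) - t0) j0
    (pvWalk b (vn : Int) dp j t0) (by omega) h0
    (by rw [pvWalk_length, hlen])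
  have hmid := pvWalk_le b (vn : Int) t0 j dp j0
  simp only [Int.toNat_natCast] at hchain
  exact le_trans hchain (by omega)

-- ---------- A's per-coefficient pass, in canonical walk form ----------

theorem pvA_inner_eq (b : Nat) (v : Int) (hb : 0 < b) (hv : 0 < v)
    (dp : List Int) (hlen : dp.length = b) :
    (PySem.List.pyRange 0 ((Int.gcd (b : Int) v : Nat) : Int) 1).foldl
      (fun dp j => pvLoopA (b : Int) v j ((2 * (b : Int)).toNat + 1) dp j 0) dp
    = List.foldl (fun dp j => pvWalk b v dp j (2 * (b / Nat.gcd b v.toNat))) dp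
        (List.range (Nat.gcd b v.toNat)) := by
  have hgcd : Int.gcd (b : Int) v = Nat.gcd b v.toNat := by
    unfold Int.gcd
    rw [Int.natAbs_natCast]
    congr 1
    omega
  rw [hgcd]
  rw [PySem.List.pyRange_one]
  simp only [sub_zero, zero_add, Int.toNat_natCast]
  rw [List.foldl_map]
  refine pvFoldl_congr_inv (fun d => d.length = b) _ _ _ _ hlen ?_ ?_
  · intro dp jn hjn hdp
    have hjg : jn < Nat.gcd b v.toNat := List.mem_range.mp hjn
    have hjb : jn < b := lt_of_lt_of_le hjg (Nat.le_of_dvd hb (Nat.gcd_dvd_left _ _))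
    have hfuel : (2 * (b : Int)).toNat + 1 = 2 * b + 1 := by
      omega
    have hvn : 0 < v.toNat := by omega
    have h0 := pvLoopA_walk b v.toNat jn hb hvn hjg ((2 * (b : Int)).toNat + 1) 0 dp hdp
      (by omega) (by
        have : b / Nat.gcd b v.toNat ≤ b := Nat.div_le_self _ _
        omega)
    simp only [Nat.zero_mul, Nat.add_zero, Nat.mod_eq_of_lt hjb, Nat.zero_div,
      Nat.cast_zero, Nat.sub_zero] at h0
    rw [show v = ((v.toNat : Nat) : Int) from (Int.toNat_of_nonneg hv.le).symm]
    simp only [Int.toNat_natCast]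
    exact h0
  · intro dp jn _ hdp
    rw [pvWalk_length, hdp]

-- ---------- completeness of A: the folded walks bound every representable sum ----------

def pvCompP (base : Int) (P : Int → Prop) (dp : List Int) : Prop :=
  ∀ l : List Int, (∀ y ∈ l, P y) → dp.getD ((l.sum % base).toNat) 0 ≤ l.sum

theorem pvCompP_mono (base : Int) (P P' : Int → Prop) (dp : List Int)
    (h : ∀ y, P' y → P y) (hc : pvCompP base P dp) : pvCompP base P' dp :=
  fun l hl => hc l (fun y hy => h y (hl y hy))

theorem pvSum_const (l : List Int) (v : Int) (h : ∀ y ∈ l, y = v) :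
    l.sum = (l.length : Int) * v := by
  induction l with
  | nil => simp
  | cons x t ih =>
    have hx : x = v := h x List.mem_cons_self
    have ht := ih (fun y hy => h y (List.mem_cons_of_mem _ hy))
    simp [hx, ht]
    push_cast
    ring

theorem pvFilter_sum (l : List Int) (p : Int → Bool) :
    (l.filter p).sum + (l.filter (fun y => !(p y))).sum = l.sum := by
  induction l with
  | nil => simp
  | cons x t ih =>
    by_cases hp : p x = true
    · simp [List.filter_cons, hp]
      omega
    · simp [List.filter_cons, hp]
      omega

theorem pvComp_extend (base : Int) (P : Int → Prop) (v : Int) (dp : List Int)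
    (hb : 0 < base) (hv : 0 < v) (hlen : dp.length = base.toNat)
    (hcomp : pvCompP base P dp) :
    pvCompP base (fun y => y = v ∨ P y)
      (List.foldl (fun dp j => pvWalk base.toNat v dp j
          (2 * (base.toNat / Nat.gcd base.toNat v.toNat))) dp
        (List.range (Nat.gcd base.toNat v.toNat))) := by
  intro l hl
  set b := base.toNat with hbdef
  have hbn : 0 < b := by omega
  set p := fun y : Int => decide (y = v) with hp
  set l2 := l.filter p with hl2def
  set l1 := l.filter (fun y => !(p y)) with hl1def
  have hsplit : l2.sum + l1.sum = l.sum := pvFilter_sum l p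
  have hall2 : ∀ y ∈ l2, y = v := by
    intro y hy
    have := List.mem_filter.mp hy
    simpa [hp] using this.2
  have hall1 : ∀ y ∈ l1, P y := by
    intro y hy
    have h1 := List.mem_filter.mp hy
    have h2 : ¬ (y = v) := by simpa [hp] using h1.2
    rcases hl y h1.1 with h | h
    · exact absurd h h2
    · exact h
  set k := l2.length with hkdef
  have hsum2 : l2.sum = (k : Int) * v := pvSum_const l2 v hall2
  have hIH := hcomp l1 hall1
  set j0 := (l1.sum % base).toNat with hj0def
  have hj0 : j0 < b := pvEmod_toNat_lt _ _ hb
  set g := Nat.gcd b v.toNat with hgdef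
  set L := b / g with hLdef
  have hgpos : 0 < g := Nat.gcd_pos_of_pos_left _ hbn
  have hLpos : 0 < L := Nat.div_pos (Nat.le_of_dvd hbn (Nat.gcd_dvd_left _ _)) hgpos
  set j := j0 % g with hjdef
  have hjg : j < g := Nat.mod_lt _ hgpos
  set k' := k % L with hk'def
  have hres : ((l.sum) % base).toNat = (j0 + k' * v.toNat) % b := by
    rw [← hsplit, hsum2]
    rw [show (k : Int) * v + l1.sum = l1.sum + ((k * v.toNat : Nat) : Int) by
      push_cast
      conv_lhs => rw [show v = ((v.toNat : Nat) : Int) from (Int.toNat_of_nonneg hv.le).symm]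
      push_cast; ring]
    rw [pvEmod_addNat _ _ _ hb]
    simp only [Int.toNat_natCast]
    rw [← hj0def]
    rw [show j0 + k * v.toNat = j0 + k * v.toNat from rfl]
    rw [pvKred b v.toNat hbn j0 k]
  rw [hres]
  have hcover := pvFoldl_cover b
    (fun dp j => pvWalk b v dp j (2 * L)) (List.range g) j
    (List.mem_range.mpr hjg)
    (fun dp y _ => pvWalk_le b v _ _ dp)
    (fun dp y _ => pvWalk_length b v _ _ dp)
    ((j0 + k' * v.toNat) % b) j0 ((k' : Int) * v)
    (fun dp hdp => by
      have := pvWalk_cover b v.toNat hbn (by omega) j j0 hjg hj0 rfl k'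
        (Nat.mod_lt _ hLpos) dp hdp
      rw [show ((v.toNat : Nat) : Int) = v from Int.toNat_of_nonneg hv.le] at this
      exact this)
    dp hlen
  refine le_trans hcover ?_
  rw [← hsplit, hsum2]
  have hk'le : (k' : Int) ≤ (k : Int) := by
    have : k' ≤ k := Nat.mod_le _ _
    exact_mod_cast this
  nlinarith [hIH, hk'le, hv]

-- ---------- A's outer fold: soundness and completeness accumulate over coefficients ----------

theorem pvA_comp (base : Int) (hb : 0 < base) :
    ∀ (Q : List Int), (∀ v ∈ Q, 0 < v) → ∀ dp (P : Int → Prop), dp.length = base.toNat →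
      pvCompP base P dp →
      pvCompP base (fun y => y ∈ Q ∨ P y)
        (List.foldl (fun dp v => List.foldl (fun dp j => pvWalk base.toNat v dp j
            (2 * (base.toNat / Nat.gcd base.toNat v.toNat))) dp
          (List.range (Nat.gcd base.toNat v.toNat))) dp Q) := by
  intro Q
  induction Q with
  | nil =>
    intro _ dp P _ hc
    refine pvCompP_mono base P _ dp ?_ hc
    intro y hy
    rcases hy with h | h
    · exact absurd h (List.not_mem_nil)
    · exact h
  | cons v Q ih =>
    intro hQ dp P hlen hc
    simp only [List.foldl_cons]
    have hv : 0 < v := hQ v List.mem_cons_self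
    have hlen1 : (List.foldl (fun dp j => pvWalk base.toNat v dp j
        (2 * (base.toNat / Nat.gcd base.toNat v.toNat))) dp
        (List.range (Nat.gcd base.toNat v.toNat))).length = base.toNat := by
      rw [pvFoldl_length _ _ _ (fun dp j _ => pvWalk_length _ _ _ _ dp), hlen]
    have hext := pvComp_extend base P v dp hb hv hlen hc
    have := ih (fun w hw => hQ w (List.mem_cons_of_mem _ hw)) _ (fun y => y = v ∨ P y) hlen1 hext
    refine pvCompP_mono base _ _ _ ?_ this
    intro y hy
    rcases hy with h | h
    · rcases List.mem_cons.mp h with h | h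
      · right; left; exact h
      · left; exact h
    · right; right; exact h

theorem pvA_inv (base : Int) (pos : List Int) (hb : 0 < base)
    (Q : List Int) (hQ : ∀ v ∈ Q, 0 < v ∧ v ∈ pos) (dp : List Int)
    (hinv : pvInv base pos dp) :
    pvInv base pos
      (List.foldl (fun dp v => List.foldl (fun dp j => pvWalk base.toNat v dp j
          (2 * (base.toNat / Nat.gcd base.toNat v.toNat))) dp
        (List.range (Nat.gcd base.toNat v.toNat))) dp Q) := by
  refine pvFoldl_pres (pvInv base pos) _ _ _ hinv ?_
  intro dp v hv hinvd
  refine pvFoldl_pres (pvInv base pos) _ _ _ hinvd ?_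
  intro dp j hj hinvd2
  have hjg : j < Nat.gcd base.toNat v.toNat := List.mem_range.mp hj
  have hbn : 0 < base.toNat := by omega
  have hjb : j < base.toNat :=
    lt_of_lt_of_le hjg (Nat.le_of_dvd hbn (Nat.gcd_dvd_left _ _))
  exact pvWalk_inv base pos v hb (hQ v hv).2 (hQ v hv).1 _ j dp hjb hinvd2

-- ---------- the initial array ----------

theorem pvDp0_len (base : Int) : ((List.replicate base.toNat pvINF).set 0 0).length = base.toNat := by
  simp

theorem pvDp0_get0 (base : Int) (hb : 0 < base) :
    ((List.replicate base.toNat pvINF).set 0 0).getD 0 0 = 0 := by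
  rw [pvGetD_set]
  rw [if_pos ⟨rfl, by simp; omega⟩]

theorem pvDp0_inv (base : Int) (pos : List Int) (hb : 0 < base) :
    pvInv base pos ((List.replicate base.toNat pvINF).set 0 0) := by
  refine ⟨pvDp0_len base, ?_⟩
  intro t ht
  by_cases h0 : t = 0
  · subst h0
    rw [pvDp0_get0 base hb]
    refine ⟨le_refl _, by norm_num [pvINF], Or.inr ⟨[], by simp, by simp, by simp⟩⟩
  · rw [pvGetD_set, if_neg (by intro hc; exact h0 hc.1.symm)]
    have : (List.replicate base.toNat pvINF).getD t 0 = pvINF := by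
      simp [List.getD_eq_getElem?_getD, List.getElem?_replicate, ht]
    rw [this]
    exact ⟨by norm_num [pvINF], le_refl _, Or.inl rfl⟩

theorem pvDp0_comp (base : Int) (hb : 0 < base) :
    pvCompP base (fun _ => False) ((List.replicate base.toNat pvINF).set 0 0) := by
  intro l hl
  cases l with
  | nil =>
    simp only [List.sum_nil, Int.zero_emod, Int.toNat_zero]
    rw [pvDp0_get0 base hb]
  | cons x t => exact absurd (hl x List.mem_cons_self) id

theorem pvDp0_sum (base : Int) (hb : 0 < base) :
    pvSum ((List.replicate base.toNat pvINF).set 0 0) < (base * pvINF).toNat + 2 := by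
  have h1 : base * pvINF = ((base.toNat * pvINF.toNat : Nat) : Int) := by
    rw [show base = ((base.toNat : Nat) : Int) from (Int.toNat_of_nonneg hb.le).symm]
    unfold pvINF
    push_cast
    norm_num
  rw [h1, Int.toNat_natCast]
  cases hbn : base.toNat with
  | zero => omega
  | succ m =>
    have : (List.replicate (m + 1) pvINF).set 0 0 = 0 :: List.replicate m pvINF := by
      simp [List.replicate_succ]
    rw [this]
    unfold pvSum
    simp only [List.map_cons, List.map_replicate, List.sum_cons, List.sum_replicate,
      smul_eq_mul, Int.toNat_zero]
    have hC : pvINF.toNat = 4000000000000000000 := rfl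
    rw [hC]
    omega

-- ---------- the master equivalence on a nonempty positive coefficient list ----------

theorem pvMain (base : Int) (pos : List Int) (hb : 0 < base)
    (hpos : ∀ v ∈ pos, 0 < v) :
    pos.foldl (fun dp v =>
        (PySem.List.pyRange 0 ((Int.gcd base v : Nat) : Int) 1).foldl
          (fun dp j => pvLoopA base v j ((2 * base).toNat + 1) dp j 0) dp)
      ((List.replicate base.toNat pvINF).set 0 0)
    = pvLoopB base pos ((base * pvINF).toNat + 2)
        ((List.replicate base.toNat pvINF).set 0 0) := by
  have hbn : 0 < base.toNat := by omega
  have hbeq : base = ((base.toNat : Nat) : Int) := (Int.toNat_of_nonneg hb.le).symm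
  set dp0 := (List.replicate base.toNat pvINF).set 0 0 with hdp0
  -- Step 1: A's fold in canonical walk form
  have hstep1 : pos.foldl (fun dp v =>
        (PySem.List.pyRange 0 ((Int.gcd base v : Nat) : Int) 1).foldl
          (fun dp j => pvLoopA base v j ((2 * base).toNat + 1) dp j 0) dp) dp0
      = List.foldl (fun dp v => List.foldl (fun dp j => pvWalk base.toNat v dp j
            (2 * (base.toNat / Nat.gcd base.toNat v.toNat))) dp
          (List.range (Nat.gcd base.toNat v.toNat))) dp0 pos := by
    refine pvFoldl_congr_inv (fun d => d.length = base.toNat) _ _ _ _ (pvDp0_len base) ?_ ?_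
    · intro dp v hv hdp
      have hv0 := hpos v hv
      have h := pvA_inner_eq base.toNat v hbn hv0 dp hdp
      rw [← h]
      congr 1 <;> rw [← hbeq]
    · intro dp v _ hdp
      rw [pvFoldl_length _ _ _ (fun dp j _ => pvWalk_length _ _ _ _ dp), hdp]
  rw [hstep1]
  -- Step 2: properties of the two results
  have hInvA := pvA_inv base pos hb pos (fun v hv => ⟨hpos v hv, hv⟩) dp0 (pvDp0_inv base pos hb)
  have hCompA' := pvA_comp base hb pos hpos dp0 (fun _ => False) (pvDp0_len base)
    (pvDp0_comp base hb)
  have hCompA : pvCompP base (fun y => y ∈ pos) _ :=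
    pvCompP_mono base _ _ _ (fun y hy => Or.inl hy) hCompA'
  obtain ⟨hRound, hLeB, hInvB⟩ := pvLoopB_spec base pos hb hpos
    ((base * pvINF).toNat + 2) dp0 (pvDp0_inv base pos hb) (pvDp0_sum base hb)
  have hFixB := pvFix_of_roundB base pos _ hb hpos hInvB.1 hRound
  have hB0 : (pvLoopB base pos ((base * pvINF).toNat + 2) dp0).getD 0 0 ≤ 0 := by
    have := hLeB 0
    rw [pvDp0_get0 base hb] at this
    exact this
  have hCompB := pvComp_of_fix base pos _ hb hpos hFixB hB0
  -- Step 3: antisymmetry entry by entry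
  set dpA := List.foldl (fun dp v => List.foldl (fun dp j => pvWalk base.toNat v dp j
        (2 * (base.toNat / Nat.gcd base.toNat v.toNat))) dp
      (List.range (Nat.gcd base.toNat v.toNat))) dp0 pos with hdpA
  set dpB := pvLoopB base pos ((base * pvINF).toNat + 2) dp0 with hdpB
  have hle1 : pvLe dpA dpB := by
    intro t
    by_cases ht : t < base.toNat
    · obtain ⟨_, _, hrep⟩ := hInvB.2 t ht
      rcases hrep with hINF | ⟨l, hl1, hl2, hl3⟩
      · rw [hINF]
        exact (hInvA.2 t ht).2.1
      · have := hCompA l hl1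
        rw [hl3] at this
        simp only [Int.toNat_natCast] at this
        rw [hl2] at this
        exact this
    · rw [pvGetD_oob dpA t (by rw [hInvA.1]; omega),
        pvGetD_oob dpB t (by rw [hInvB.1]; omega)]
  have hle2 : pvLe dpB dpA := by
    intro t
    by_cases ht : t < base.toNat
    · obtain ⟨_, _, hrep⟩ := hInvA.2 t ht
      rcases hrep with hINF | ⟨l, hl1, hl2, hl3⟩
      · rw [hINF]
        exact (hInvB.2 t ht).2.1
      · have := hCompB l hl1
        rw [hl3] at this
        simp only [Int.toNat_natCast] at this
        rw [hl2] at this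
        exact this
    · rw [pvGetD_oob dpA t (by rw [hInvA.1]; omega),
        pvGetD_oob dpB t (by rw [hInvB.1]; omega)]
  exact pvEq_of_le_le (by rw [hInvA.1, hInvB.1]) hle1 hle2

theorem pvFinal : ∀ (coeffs : List Int), modShortestPath coeffs = modShortestPath_alt coeffs := by
  intro coeffs
  unfold modShortestPath modShortestPath_alt
  by_cases hE : (coeffs.filter (fun v => decide (0 < v))).isEmpty = true
  · rw [if_pos hE, if_pos hE]
  · rw [if_neg hE, if_neg hE]
    set pos := coeffs.filter (fun v => decide (0 < v)) with hposdef
    have hne : pos ≠ [] := by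
      intro hcon
      exact hE (by rw [hposdef] at hcon ⊢; rw [hcon]; rfl)
    have hpos : ∀ v ∈ pos, 0 < v := by
      intro v hv
      have := List.mem_filter.mp (hposdef ▸ hv)
      exact of_decide_eq_true this.2
    cases hm : PySem.List.min? pos (fun x => x) with
    | none => exact absurd ((PySem.List.min?_eq_none_iff pos (fun x => x)).mp hm) hne
    | some m =>
      have hmem : m ∈ pos := PySem.List.min?_mem hm
      have hmpos : 0 < m := hpos m hmem
      simp only [hm, Option.getD_some]
      exact congrArg (Prod.mk m) (pvMain m pos hmpos hpos)

-- ===== VERDICT (by name: the statement is the Claim_ definition above) =====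
theorem modShortestPath_spec : Claim_equal_modShortestPath := by
  intro coeffs _
  unfold Spec_modShortestPath
  exact pvFinal coeffs
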